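-- pv_equiv track=rewrite | github.com/esafouan/portfolio2 | bird_nest_solution.py | solution
-- ===== SOURCE A (Python) =====
-- def solution(forest, bird):
--     # Initialize variables
--     direction = True  # True for right, False for left
--     total_sticks = 0  # Total length of sticks collected
--     output = []  # Indices of found sticks
--
--     # Continue until we've collected at least 100 length of sticks
--     while total_sticks < 100:
--         # If moving right
--         if direction:
--             # Look for sticks to the right
--             i = bird + 1  # Start looking from the position right after bird
--             while i < len(forest) and forest[i] == 0:
--                 i += 1
--
--             # If we found a stick
--             if i < len(forest):
--                 output.append(i)
--                 total_sticks += forest[i]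
--                 # Mark the position as empty after taking the stick
--                 forest = forest.copy()  # Create a copy to avoid modifying the original
--                 forest[i] = 0
--             else:
--                 # If we reached the end without finding a stick, break
--                 break
--         # If moving left
--         else:
--             # Look for sticks to the left
--             i = bird - 1  # Start looking from the position left before bird
--             while i >= 0 and forest[i] == 0:
--                 i -= 1
--
--             # If we found a stick
--             if i >= 0:
--                 output.append(i)
--                 total_sticks += forest[i]
--                 # Mark the position as empty after taking the stick
--                 forest = forest.copy()  # Create a copy to avoid modifying the original
--                 forest[i] = 0
--             else:
--                 # If we reached the beginning without finding a stick, break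
--                 break
--
--         # Change direction for next iteration
--         direction = not direction
--
--     return output
-- ===== SOURCE B (Python) =====
-- def solution(forest, bird):
--     # Precompute each side's stick indices once, nearest-first, then merge
--     # alternately with running pointers and a running sum.
--     n = len(forest)
--     right = [i for i in range(max(bird + 1, 0), n) if forest[i] != 0]
--     left = [i for i in range(min(bird, n) - 1, -1, -1) if forest[i] != 0]
--     out = []
--     total = 0
--     r = 0
--     l = 0
--     while total < 100:
--         if len(out) % 2 == 0:
--             if r >= len(right):
--                 break
--             i = right[r]
--             r += 1
--         else:
--             if l >= len(left):
--                 break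
--             i = left[l]
--             l += 1
--         out.append(i)
--         total += forest[i]
--     return out
-- ===== Notes on version B (the rewrite author's own statement) =====
-- stated objective: alternative
-- what changed: B precomputes each side's nonzero stick indices once (nearest-first) and alternates between the two lists with running pointers, instead of rescanning the forest from the bird's position for every stick taken.
-- intended difference: For bird <= -2 with some stick among the last -bird-1 forest positions, Python's negative-index wraparound makes A scan the END of the forest first and return a negative index (e.g. [-1]); B treats such a bird as sitting left of the forest and returns the nearest stick's ordinary nonnegative index, which is the intended value. — e.g. on solution([5, 100], -2): A returns [-1], B returns [0]
import Mathlib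
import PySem

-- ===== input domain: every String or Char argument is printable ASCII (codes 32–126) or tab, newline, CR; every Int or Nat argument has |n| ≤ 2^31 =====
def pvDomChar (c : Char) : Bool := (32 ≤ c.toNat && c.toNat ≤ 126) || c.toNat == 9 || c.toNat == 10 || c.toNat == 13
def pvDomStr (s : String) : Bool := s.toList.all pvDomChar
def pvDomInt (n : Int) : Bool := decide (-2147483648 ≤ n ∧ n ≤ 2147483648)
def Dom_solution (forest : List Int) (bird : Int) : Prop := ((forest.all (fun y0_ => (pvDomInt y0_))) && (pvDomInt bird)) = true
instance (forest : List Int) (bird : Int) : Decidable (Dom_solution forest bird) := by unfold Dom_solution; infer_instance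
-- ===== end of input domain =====

-- B precomputes each side's stick indices once and merges them alternately with two
-- running pointers, instead of A's rescan-from-the-bird-per-stick; return values only.

-- ===== PORT A =====
-- inner `while i < len(forest) and forest[i] == 0: i += 1`; the fuel ((len - i).toNat)
-- is exactly the number of remaining loop steps, so the loop body is unchanged.
def aFindRightGo (forest : List Int) : Nat → Int → Int
  | 0, i => i
  | fuel + 1, i =>
    if i < (forest.length : Int) then
      match PySem.List.pyGet? forest i with
      | some v => if v = 0 then aFindRightGo forest fuel (i + 1) else i
      | none => i
    else i

def aFindRight (forest : List Int) (i : Int) : Int :=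
  aFindRightGo forest ((forest.length : Int) - i).toNat i

-- inner `while i >= 0 and forest[i] == 0: i -= 1`; fuel (i+1).toNat counts its steps.
def aFindLeftGo (forest : List Int) : Nat → Int → Int
  | 0, i => i
  | fuel + 1, i =>
    if 0 ≤ i then
      match PySem.List.pyGet? forest i with
      | some v => if v = 0 then aFindLeftGo forest fuel (i - 1) else i
      | none => i
    else i

def aFindLeft (forest : List Int) (i : Int) : Int :=
  aFindLeftGo forest (i + 1).toNat i

-- outer `while total_sticks < 100` loop; each iteration that recurses zeroes a
-- nonzero cell, so the forest.length + 1 fuel passed by `solution` never runs out.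
def aLoop (forest : List Int) (bird : Int) : Nat → Bool → Int → List Int → List Int
  | 0, _, _, output => output
  | fuel + 1, direction, total, output =>
    if total < 100 then
      if direction then
        let i := aFindRight forest (bird + 1)
        if i < (forest.length : Int) then
          match PySem.List.pyGet? forest i with
          | some v =>
              aLoop (PySem.List.pySetD forest i 0) bird fuel (!direction) (total + v) (output ++ [i])
          | none => output
        else output
      else
        let i := aFindLeft forest (bird - 1)
        if 0 ≤ i then
          match PySem.List.pyGet? forest i with
          | some v =>
              aLoop (PySem.List.pySetD forest i 0) bird fuel (!direction) (total + v) (output ++ [i])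
          | none => output
        else output
    else output

def solution (forest : List Int) (bird : Int) : List Int :=
  aLoop forest bird (forest.length + 1) true 0 []

-- ===== PORT B =====
-- the `while total < 100` merge loop of Source B; one list element is consumed per
-- iteration, so the right.length + left.length + 1 fuel passed below never runs out.
def bLoopGo (forest right left : List Int) : Nat → Nat → Nat → Int → List Int → List Int
  | 0, _, _, _, out => out
  | fuel + 1, r, l, total, out =>
    if total < 100 then
      if out.length % 2 == 0 then
        if right.length ≤ r then out
        else
          let i := right.getD r 0
          bLoopGo forest right left fuel (r + 1) l (total + PySem.List.pyGetD forest i 0) (out ++ [i])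
      else
        if left.length ≤ l then out
        else
          let i := left.getD l 0
          bLoopGo forest right left fuel r (l + 1) (total + PySem.List.pyGetD forest i 0) (out ++ [i])
    else out

def solution_alt (forest : List Int) (bird : Int) : List Int :=
  let n : Int := forest.length
  let right := (PySem.List.pyRange (max (bird + 1) 0) n 1).filter
      (fun i => PySem.List.pyGetD forest i 0 != 0)
  let left := (PySem.List.pyRange (min bird n - 1) (-1) (-1)).filter
      (fun i => PySem.List.pyGetD forest i 0 != 0)
  bLoopGo forest right left (right.length + left.length + 1) 0 0 0 []

-- ===== PRECONDITION & SPEC =====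
-- Pre_ excludes exactly the inputs on which A raises IndexError (the first probe
-- index bird+1 falls below -len(forest)); everywhere else A returns normally.
def Pre_solution (forest : List Int) (bird : Int) : Prop :=
  -(forest.length : Int) ≤ bird + 1
instance (forest : List Int) (bird : Int) : Decidable (Pre_solution forest bird) := by
  unfold Pre_solution; infer_instance

def pvWitness_solution : List Int × Int := ([5, 100, 3], 0)

-- For bird ≤ -2 with some stick among the last -bird-1 positions, Python's
-- negative-index wraparound makes A scan the END of the forest first and return a
-- negative index; B treats such a bird as sitting left of the forest and returns
-- the nearest stick's ordinary nonnegative index, which is the intended value.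
def D_solution (forest : List Int) (bird : Int) : Prop :=
  bird ≤ -2 ∧ ∃ v ∈ forest.drop (((forest.length : Int) + bird + 1).toNat), v ≠ 0
instance (forest : List Int) (bird : Int) : Decidable (D_solution forest bird) := by
  unfold D_solution; infer_instance

def Spec_solution (forest : List Int) (bird : Int) (out : List Int) : Prop :=
  ¬ D_solution forest bird → out = solution_alt forest bird
instance (forest : List Int) (bird : Int) (out : List Int) : Decidable (Spec_solution forest bird out) := by
  unfold Spec_solution; infer_instance

def pvDiffWitness_solution : List Int × Int := ([5, 100], -2)
def pvDiffWitnessOut_solution : (List Int) × (List Int) := ([-1], [0])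

-- ===== CLAIM (what is proved, stated in full; the proofs are below) =====
def Claim_unchanged_solution : Prop := ∀ (forest : List Int) (bird : Int), Dom_solution forest bird → Pre_solution forest bird → Spec_solution forest bird (solution forest bird)
def Claim_changed_solution : Prop := Dom_solution (pvDiffWitness_solution.1) (pvDiffWitness_solution.2) ∧ Pre_solution (pvDiffWitness_solution.1) (pvDiffWitness_solution.2) ∧ D_solution (pvDiffWitness_solution.1) (pvDiffWitness_solution.2) ∧ solution (pvDiffWitness_solution.1) (pvDiffWitness_solution.2) = pvDiffWitnessOut_solution.1 ∧ solution_alt (pvDiffWitness_solution.1) (pvDiffWitness_solution.2) = pvDiffWitnessOut_solution.2 ∧ pvDiffWitnessOut_solution.1 ≠ pvDiffWitnessOut_solution.2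
def Claim_exact_solution : Prop := ∀ (forest : List Int) (bird : Int), Dom_solution forest bird → Pre_solution forest bird → D_solution forest bird → solution forest bird ≠ solution_alt forest bird

-- ===== LEMMAS AND PROOFS =====
def nzP (forest : List Int) : Int → Bool := fun i => PySem.List.pyGetD forest i 0 != 0

def Rlist (n bird : Int) (f : List Int) : List Int :=
  (PySem.List.pyRange (max (bird + 1) 0) n 1).filter (nzP f)

def Llist (n bird : Int) (f : List Int) : List Int :=
  (PySem.List.pyRange (min bird n - 1) (-1) (-1)).filter (nzP f)

theorem solution_alt_eq (forest : List Int) (bird : Int) :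
    solution_alt forest bird =
      bLoopGo forest (Rlist (forest.length : Int) bird forest) (Llist (forest.length : Int) bird forest)
        ((Rlist (forest.length : Int) bird forest).length + (Llist (forest.length : Int) bird forest).length + 1)
        0 0 0 [] := rfl

theorem findRight_nil (f : List Int) :
    ∀ (k : Nat) (s : Int), ((f.length : Int) - s).toNat = k → 0 ≤ s →
      (PySem.List.pyRange s (f.length : Int) 1).filter (nzP f) = [] →
      (f.length : Int) ≤ aFindRight f s := by
  intro k
  induction k with
  | zero =>
    intro s hk hs _
    unfold aFindRight; rw [hk]; simp only [aFindRightGo]; omega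
  | succ k ih =>
    intro s hk hs hfil
    have hlt : s < (f.length : Int) := by omega
    have hsn : s.toNat < f.length := by omega
    have hg : PySem.List.pyGet? f s = some f[s.toNat] :=
      PySem.List.pyGet?_eq_some_getElem f hs hlt
    have hgd : PySem.List.pyGetD f s 0 = f[s.toNat] :=
      PySem.List.pyGetD_eq_getElem f 0 hs hlt
    rw [PySem.List.pyRange_one_cons hlt, List.filter_cons] at hfil
    unfold aFindRight; rw [hk]
    simp only [aFindRightGo, if_pos hlt, hg]
    by_cases hv : f[s.toNat] = 0
    · simp only [hv]
      have hnz : nzP f s = false := by simp [nzP, hgd, hv]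
      simp only [hnz, Bool.false_eq_true, if_false] at hfil
      have := ih (s + 1) (by omega) (by omega) hfil
      unfold aFindRight at this
      rwa [show ((f.length : Int) - (s + 1)).toNat = k by omega] at this
    · have hnz : nzP f s = true := by simp [nzP, hgd, hv]
      simp [hnz] at hfil

theorem findRight_head (f : List Int) :
    ∀ (k : Nat) (s j : Int) (rest : List Int), ((f.length : Int) - s).toNat = k → 0 ≤ s →
      (PySem.List.pyRange s (f.length : Int) 1).filter (nzP f) = j :: rest →
      aFindRight f s = j := by
  intro k
  induction k with
  | zero =>
    intro s j rest hk hs hfil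
    rw [PySem.List.pyRange_one_eq_nil (by omega)] at hfil
    simp at hfil
  | succ k ih =>
    intro s j rest hk hs hfil
    by_cases hlt : s < (f.length : Int)
    · have hsn : s.toNat < f.length := by omega
      have hg : PySem.List.pyGet? f s = some f[s.toNat] :=
        PySem.List.pyGet?_eq_some_getElem f hs hlt
      have hgd : PySem.List.pyGetD f s 0 = f[s.toNat] :=
        PySem.List.pyGetD_eq_getElem f 0 hs hlt
      rw [PySem.List.pyRange_one_cons hlt, List.filter_cons] at hfil
      unfold aFindRight; rw [hk]
      simp only [aFindRightGo, if_pos hlt, hg]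
      by_cases hv : f[s.toNat] = 0
      · simp only [hv]
        have hnz : nzP f s = false := by simp [nzP, hgd, hv]
        simp only [hnz, Bool.false_eq_true, if_false] at hfil
        have := ih (s + 1) j rest (by omega) (by omega) hfil
        unfold aFindRight at this
        rw [show ((f.length : Int) - (s + 1)).toNat = k by omega] at this
        simpa using this
      · have hnz : nzP f s = true := by simp [nzP, hgd, hv]
        simp [hnz] at hfil
        obtain ⟨rfl, -⟩ := hfil
        simp [hv]
    · rw [PySem.List.pyRange_one_eq_nil (by omega)] at hfil
      simp at hfil

theorem findLeft_nil (f : List Int) :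
    ∀ (k : Nat) (s : Int), (s + 1).toNat = k → s < (f.length : Int) →
      (PySem.List.pyRange s (-1) (-1)).filter (nzP f) = [] →
      aFindLeft f s < 0 := by
  intro k
  induction k with
  | zero =>
    intro s hk hs _
    unfold aFindLeft; rw [hk]; simp only [aFindLeftGo]; omega
  | succ k ih =>
    intro s hk hs hfil
    have hnn : 0 ≤ s := by omega
    have hsn : s.toNat < f.length := by omega
    have hg : PySem.List.pyGet? f s = some f[s.toNat] :=
      PySem.List.pyGet?_eq_some_getElem f hnn hs
    have hgd : PySem.List.pyGetD f s 0 = f[s.toNat] :=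
      PySem.List.pyGetD_eq_getElem f 0 hnn hs
    rw [PySem.List.pyRange_neg_one_cons (by omega), List.filter_cons] at hfil
    unfold aFindLeft; rw [hk]
    simp only [aFindLeftGo, if_pos hnn, hg]
    by_cases hv : f[s.toNat] = 0
    · simp only [hv]
      have hnz : nzP f s = false := by simp [nzP, hgd, hv]
      simp only [hnz, Bool.false_eq_true, if_false] at hfil
      have := ih (s - 1) (by omega) (by omega) hfil
      unfold aFindLeft at this
      rw [show (s - 1 + 1).toNat = k by omega] at this
      simpa using this
    · have hnz : nzP f s = true := by simp [nzP, hgd, hv]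
      simp [hnz] at hfil

theorem findLeft_head (f : List Int) :
    ∀ (k : Nat) (s j : Int) (rest : List Int), (s + 1).toNat = k → s < (f.length : Int) →
      (PySem.List.pyRange s (-1) (-1)).filter (nzP f) = j :: rest →
      aFindLeft f s = j := by
  intro k
  induction k with
  | zero =>
    intro s j rest hk hs hfil
    rw [PySem.List.pyRange_neg_one_eq_nil (by omega)] at hfil
    simp at hfil
  | succ k ih =>
    intro s j rest hk hs hfil
    have hnn : 0 ≤ s := by omega
    have hsn : s.toNat < f.length := by omega
    have hg : PySem.List.pyGet? f s = some f[s.toNat] :=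
      PySem.List.pyGet?_eq_some_getElem f hnn hs
    have hgd : PySem.List.pyGetD f s 0 = f[s.toNat] :=
      PySem.List.pyGetD_eq_getElem f 0 hnn hs
    rw [PySem.List.pyRange_neg_one_cons (by omega), List.filter_cons] at hfil
    unfold aFindLeft; rw [hk]
    simp only [aFindLeftGo, if_pos hnn, hg]
    by_cases hv : f[s.toNat] = 0
    · simp only [hv]
      have hnz : nzP f s = false := by simp [nzP, hgd, hv]
      simp only [hnz, Bool.false_eq_true, if_false] at hfil
      have := ih (s - 1) j rest (by omega) (by omega) hfil
      unfold aFindLeft at this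
      rw [show (s - 1 + 1).toNat = k by omega] at this
      simpa using this
    · have hnz : nzP f s = true := by simp [nzP, hgd, hv]
      simp [hnz] at hfil
      obtain ⟨rfl, -⟩ := hfil
      simp [hv]

theorem filter_update_false {rng rest : List Int} (j : Int) (q q' : Int → Bool)
    (hnd : rng.Nodup) (hq : ∀ i ∈ rng, i ≠ j → q' i = q i) (hj : q' j = false)
    (h : rng.filter q = j :: rest) : rng.filter q' = rest := by
  induction rng with
  | nil => simp at h
  | cons a t ih =>
    rw [List.filter_cons] at h ⊢
    rcases List.nodup_cons.mp hnd with ⟨hna, hndt⟩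
    by_cases hqa : q a = true
    · rw [if_pos hqa] at h
      have hja : a = j := (List.cons.injEq .. ▸ h).1
      subst hja
      rw [hj, if_neg (by simp)]
      have hrest : t.filter q = rest := (List.cons.injEq .. ▸ h).2
      rw [← hrest]
      exact List.filter_congr (fun i hi => hq i (List.mem_cons_of_mem _ hi)
        (fun hij => hna (hij ▸ hi)))
    · rw [if_neg hqa] at h
      have haj : a ≠ j := by
        intro hij
        have : j ∈ t.filter q := h ▸ List.mem_cons_self ..
        exact hna (hij ▸ List.mem_of_mem_filter this)
      rw [hq a (List.mem_cons_self ..) haj, if_neg hqa]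
      exact ih hndt (fun i hi hij => hq i (List.mem_cons_of_mem _ hi) hij) h

theorem getD_setD (f : List Int) (i j v : Int) (hi : 0 ≤ i) (hj : 0 ≤ j) (hjl : j < (f.length : Int)) :
    PySem.List.pyGetD (PySem.List.pySetD f j v) i 0 = if i = j then v else PySem.List.pyGetD f i 0 := by
  lift j to ℕ using hj
  lift i to ℕ using hi
  rw [PySem.List.pyGetD_pySetD_natCast f j i v 0 (by exact_mod_cast hjl)]
  simp

theorem sim (forest : List Int) (bird : Int) (hbird : -1 ≤ bird) :
    ∀ (fa : Nat) (f : List Int) (r l : Nat) (total : Int) (out : List Int) (dir : Bool) (fb : Nat),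
    f.length = forest.length →
    (Rlist (forest.length : Int) bird forest).drop r = Rlist (forest.length : Int) bird f →
    (Llist (forest.length : Int) bird forest).drop l = Llist (forest.length : Int) bird f →
    (∀ i ∈ Rlist (forest.length : Int) bird f, PySem.List.pyGetD f i 0 = PySem.List.pyGetD forest i 0) →
    (∀ i ∈ Llist (forest.length : Int) bird f, PySem.List.pyGetD f i 0 = PySem.List.pyGetD forest i 0) →
    dir = (out.length % 2 == 0) →
    (dir = false → bird - 1 < (forest.length : Int)) →
    ((Rlist (forest.length : Int) bird forest).length - r) + ((Llist (forest.length : Int) bird forest).length - l) < fa →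
    ((Rlist (forest.length : Int) bird forest).length - r) + ((Llist (forest.length : Int) bird forest).length - l) < fb →
    aLoop f bird fa dir total out =
      bLoopGo forest (Rlist (forest.length : Int) bird forest) (Llist (forest.length : Int) bird forest) fb r l total out := by
  intro fa
  induction fa with
  | zero => intro f r l total out dir fb _ _ _ _ _ _ _ hfa _; omega
  | succ fa ih =>
    intro f r l total out dir fb hlen hR hL hvR hvL hdir hdirImp hfa hfb
    have hlen' : (f.length : Int) = (forest.length : Int) := by rw [hlen]
    obtain ⟨fb, rfl⟩ : ∃ fb', fb = fb' + 1 := ⟨fb - 1, by omega⟩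
    simp only [aLoop, bLoopGo]
    by_cases htot : total < 100
    · rw [if_pos htot, if_pos htot]
      have hmax : max (bird + 1) 0 = bird + 1 := by omega
      cases dir with
      | true =>
        rw [if_pos rfl, if_pos hdir.symm]
        cases hRf : Rlist (forest.length : Int) bird f with
        | nil =>
          have hfil : (PySem.List.pyRange (bird + 1) ((f.length : Int)) 1).filter (nzP f) = [] := by
            rw [hlen']
            have := hRf; unfold Rlist at this; rwa [hmax] at this
          have hge := findRight_nil f _ (bird + 1) rfl (by omega) hfil
          rw [if_neg (by omega)]
          rw [if_pos (List.drop_eq_nil_iff.mp (hR.trans hRf))]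
        | cons j rest =>
          have hfil : (PySem.List.pyRange (bird + 1) ((f.length : Int)) 1).filter (nzP f) = j :: rest := by
            rw [hlen']
            have := hRf; unfold Rlist at this; rwa [hmax] at this
          have hjRf : j ∈ Rlist (forest.length : Int) bird f := by rw [hRf]; exact List.mem_cons_self ..
          have hjrng : j ∈ PySem.List.pyRange (bird + 1) ((forest.length : Int)) 1 := by
            have := List.mem_of_mem_filter (p := nzP f) (by unfold Rlist at hjRf; rwa [hmax] at hjRf)
            exact this
          have hjb := PySem.List.mem_pyRange_one.mp hjrng
          have hjnz : nzP f j = true := List.of_mem_filter (by unfold Rlist at hjRf; rwa [hmax] at hjRf)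
          have hfind : aFindRight f (bird + 1) = j := findRight_head f _ (bird + 1) j rest rfl (by omega) hfil
          rw [hfind, if_pos (by omega)]
          have hj0 : (0:Int) ≤ j := by omega
          have hjf : j < (f.length : Int) := by omega
          have hg : PySem.List.pyGet? f j = some f[j.toNat] :=
            PySem.List.pyGet?_eq_some_getElem f hj0 hjf
          have hgd : PySem.List.pyGetD f j 0 = f[j.toNat] :=
            PySem.List.pyGetD_eq_getElem f 0 hj0 hjf
          rw [hg]
          -- B side takes the same index and value
          have hdropne : (Rlist (forest.length : Int) bird forest).drop r ≠ [] := by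
            rw [hR, hRf]; simp
          have hrlt : r < (Rlist (forest.length : Int) bird forest).length := by
            by_contra hcon
            exact hdropne (List.drop_eq_nil_iff.mpr (by omega))
          rw [if_neg (by omega)]
          have hidx : (Rlist (forest.length : Int) bird forest)[r]? = some j := by
            have h := List.getElem?_drop (xs := Rlist (forest.length : Int) bird forest) (i := r) (j := 0)
            rw [hR, hRf] at h
            simpa using h.symm
          have hgetr : (Rlist (forest.length : Int) bird forest).getD r 0 = j := by
            rw [List.getD_eq_getElem?_getD, hidx]; rfl
          rw [hgetr]
          have hvj : PySem.List.pyGetD forest j 0 = f[j.toNat] := by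
            rw [← hvR j hjRf, hgd]
          rw [hvj]
          -- re-establish the invariant for the next state
          have upd : ∀ i : Int, 0 ≤ i →
              PySem.List.pyGetD (PySem.List.pySetD f j 0) i 0 =
                if i = j then 0 else PySem.List.pyGetD f i 0 :=
            fun i hi => getD_setD f i j 0 hi hj0 hjf
          have hRf' : Rlist (forest.length : Int) bird (PySem.List.pySetD f j 0) = rest := by
            unfold Rlist
            refine filter_update_false j (nzP f) _ (PySem.List.nodup_pyRange_one ..) ?_ ?_ ?_
            · intro i hirng hij
              have hib := PySem.List.mem_pyRange_one.mp (by rwa [hmax] at hirng)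
              simp [nzP, upd i (by omega), hij]
            · simp [nzP, upd j hj0]
            · unfold Rlist at hRf; exact hRf
          have hLf' : Llist (forest.length : Int) bird (PySem.List.pySetD f j 0) =
              Llist (forest.length : Int) bird f := by
            unfold Llist
            refine List.filter_congr ?_
            intro i hirng
            have hib := PySem.List.mem_pyRange_neg_one.mp hirng
            have hij : i ≠ j := by omega
            simp [nzP, upd i (by omega), hij]
          have hnodup : (j :: rest).Nodup := by
            rw [← hRf]
            unfold Rlist
            exact List.Nodup.filter _ (PySem.List.nodup_pyRange_one ..)
          have h0 : out.length % 2 = 0 := by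
            have := hdir.symm; simpa using this
          have := ih (PySem.List.pySetD f j 0) (r + 1) l (total + f[j.toNat]) (out ++ [j]) false fb
            (by rw [PySem.List.length_pySetD, hlen])
            (by rw [← List.drop_drop, hR, hRf, hRf']; simp)
            (by rw [hL, hLf'])
            (by intro i hi
                rw [hRf'] at hi
                have hiRf : i ∈ Rlist (forest.length : Int) bird f := by
                  rw [hRf]; exact List.mem_cons_of_mem _ hi
                have hij : i ≠ j := fun h => (List.nodup_cons.mp hnodup).1 (h ▸ hi)
                have hib : (0:Int) ≤ i := by
                  have h1 := List.mem_of_mem_filter (p := nzP f) (by unfold Rlist at hiRf; exact hiRf)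
                  rw [hmax] at h1
                  have := PySem.List.mem_pyRange_one.mp h1
                  omega
                rw [upd i hib, if_neg hij]
                exact hvR i hiRf)
            (by intro i hi
                rw [hLf'] at hi
                have hib := PySem.List.mem_pyRange_neg_one.mp
                  (List.mem_of_mem_filter (p := nzP f) hi)
                have hij : i ≠ j := by omega
                rw [upd i (by omega), if_neg hij]
                exact hvL i hi)
            (by simp [List.length_append]; omega)
            (by intro _; omega)
            (by omega) (by omega)
          simpa using this
      | false =>
        rw [if_neg (show ¬(false = true) by simp),
            if_neg (show ¬((out.length % 2 == 0) = true) by simp [← hdir])]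
        have hblt : bird - 1 < (forest.length : Int) := hdirImp rfl
        have hmin : min bird ((forest.length : Int)) = bird := by omega
        cases hLf : Llist (forest.length : Int) bird f with
        | nil =>
          have hfil : (PySem.List.pyRange (bird - 1) (-1) (-1)).filter (nzP f) = [] := by
            have := hLf; unfold Llist at this; rwa [hmin, show bird - 1 = bird - 1 from rfl] at this
          have hlt := findLeft_nil f _ (bird - 1) rfl (by omega) hfil
          rw [if_neg (by omega)]
          rw [if_pos (List.drop_eq_nil_iff.mp (hL.trans hLf))]
        | cons j rest =>
          have hfil : (PySem.List.pyRange (bird - 1) (-1) (-1)).filter (nzP f) = j :: rest := by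
            have := hLf; unfold Llist at this; rwa [hmin] at this
          have hjLf : j ∈ Llist (forest.length : Int) bird f := by rw [hLf]; exact List.mem_cons_self ..
          have hjrng : j ∈ PySem.List.pyRange (min bird ((forest.length : Int)) - 1) (-1) (-1) :=
            List.mem_of_mem_filter (p := nzP f) (by unfold Llist at hjLf; exact hjLf)
          have hjb := PySem.List.mem_pyRange_neg_one.mp hjrng
          have hjnz : nzP f j = true := List.of_mem_filter (by unfold Llist at hjLf; exact hjLf)
          have hfind : aFindLeft f (bird - 1) = j := findLeft_head f _ (bird - 1) j rest rfl (by omega) hfil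
          rw [hfind, if_pos (by omega)]
          have hj0 : (0:Int) ≤ j := by omega
          have hjf : j < (f.length : Int) := by omega
          have hg : PySem.List.pyGet? f j = some f[j.toNat] :=
            PySem.List.pyGet?_eq_some_getElem f hj0 hjf
          have hgd : PySem.List.pyGetD f j 0 = f[j.toNat] :=
            PySem.List.pyGetD_eq_getElem f 0 hj0 hjf
          rw [hg]
          have hdropne : (Llist (forest.length : Int) bird forest).drop l ≠ [] := by
            rw [hL, hLf]; simp
          have hllt : l < (Llist (forest.length : Int) bird forest).length := by
            by_contra hcon
            exact hdropne (List.drop_eq_nil_iff.mpr (by omega))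
          rw [if_neg (by omega)]
          have hidx : (Llist (forest.length : Int) bird forest)[l]? = some j := by
            have h := List.getElem?_drop (xs := Llist (forest.length : Int) bird forest) (i := l) (j := 0)
            rw [hL, hLf] at h
            simpa using h.symm
          have hgetl : (Llist (forest.length : Int) bird forest).getD l 0 = j := by
            rw [List.getD_eq_getElem?_getD, hidx]; rfl
          rw [hgetl]
          have hvj : PySem.List.pyGetD forest j 0 = f[j.toNat] := by
            rw [← hvL j hjLf, hgd]
          rw [hvj]
          have upd : ∀ i : Int, 0 ≤ i →
              PySem.List.pyGetD (PySem.List.pySetD f j 0) i 0 =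
                if i = j then 0 else PySem.List.pyGetD f i 0 :=
            fun i hi => getD_setD f i j 0 hi hj0 hjf
          have hLf' : Llist (forest.length : Int) bird (PySem.List.pySetD f j 0) = rest := by
            unfold Llist
            refine filter_update_false j (nzP f) _ ?_ ?_ ?_ ?_
            · rw [PySem.List.pyRange_neg_one_eq_reverse]
              exact List.nodup_reverse.mpr (PySem.List.nodup_pyRange_one ..)
            · intro i hirng hij
              have hib := PySem.List.mem_pyRange_neg_one.mp hirng
              simp [nzP, upd i (by omega), hij]
            · simp [nzP, upd j hj0]
            · unfold Llist at hLf; exact hLf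
          have hRf' : Rlist (forest.length : Int) bird (PySem.List.pySetD f j 0) =
              Rlist (forest.length : Int) bird f := by
            unfold Rlist
            refine List.filter_congr ?_
            intro i hirng
            have hib := PySem.List.mem_pyRange_one.mp (by rwa [hmax] at hirng)
            have hij : i ≠ j := by omega
            simp [nzP, upd i (by omega), hij]
          have hnodup : (j :: rest).Nodup := by
            rw [← hLf]
            unfold Llist
            exact List.Nodup.filter _ (by
              rw [PySem.List.pyRange_neg_one_eq_reverse]
              exact List.nodup_reverse.mpr (PySem.List.nodup_pyRange_one ..))
          have h0 : out.length % 2 = 1 := by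
            have := hdir.symm
            simp at this
            omega
          have := ih (PySem.List.pySetD f j 0) r (l + 1) (total + f[j.toNat]) (out ++ [j]) true fb
            (by rw [PySem.List.length_pySetD, hlen])
            (by rw [hR, hRf'])
            (by rw [← List.drop_drop, hL, hLf, hLf']; simp)
            (by intro i hi
                rw [hRf'] at hi
                have hib := PySem.List.mem_pyRange_one.mp
                  (by have := List.mem_of_mem_filter (p := nzP f) (by unfold Rlist at hi; exact hi)
                      rwa [hmax] at this)
                have hij : i ≠ j := by omega
                rw [upd i (by omega), if_neg hij]
                exact hvR i hi)
            (by intro i hi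
                rw [hLf'] at hi
                have hiLf : i ∈ Llist (forest.length : Int) bird f := by
                  rw [hLf]; exact List.mem_cons_of_mem _ hi
                have hij : i ≠ j := fun h => (List.nodup_cons.mp hnodup).1 (h ▸ hi)
                have hib := PySem.List.mem_pyRange_neg_one.mp
                  (List.mem_of_mem_filter (p := nzP f) (by unfold Llist at hiLf; exact hiLf))
                rw [upd i (by omega), if_neg hij]
                exact hvL i hiLf)
            (by simp [List.length_append]; omega)
            (by intro h; simp at h)
            (by omega) (by omega)
          simpa using this
    · rw [if_neg htot, if_neg htot]

theorem aLoop_stop_left (f : List Int) (bird : Int) (fuel : Nat) (hfuel : fuel ≠ 0)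
    (total : Int) (out : List Int) (hfl : aFindLeft f (bird - 1) < 0) :
    aLoop f bird fuel false total out = out := by
  obtain ⟨m, rfl⟩ : ∃ m, fuel = m + 1 := ⟨fuel - 1, by omega⟩
  simp only [aLoop]
  by_cases h1 : total < 100
  · rw [if_pos h1, if_neg (show ¬(false = true) by simp), if_neg (by omega)]
  · rw [if_neg h1]

theorem bLoopGo_stop (forest right left : List Int) (fuel : Nat) (hfuel : fuel ≠ 0)
    (r l : Nat) (total : Int) (out : List Int)
    (hpar : (out.length % 2 == 0) = false) (hl : left.length ≤ l) :
    bLoopGo forest right left fuel r l total out = out := by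
  obtain ⟨m, rfl⟩ : ∃ m, fuel = m + 1 := ⟨fuel - 1, by omega⟩
  simp only [bLoopGo]
  by_cases h1 : total < 100
  · rw [if_pos h1, if_neg (by simp [hpar]), if_pos hl]
  · rw [if_neg h1]

theorem negscan (forest : List Int) (bird : Int) (hb2 : bird ≤ -2)
    (hpre : -(forest.length : Int) ≤ bird + 1)
    (hz : ∀ v ∈ forest.drop (((forest.length : Int) + bird + 1).toNat), v = 0) :
    ∀ (k : Nat) (s : Int), (-s).toNat = k → bird + 1 ≤ s → s ≤ 0 →
      aFindRight forest s = aFindRight forest 0 := by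
  have hn1 : 1 ≤ forest.length := by omega
  intro k
  induction k with
  | zero =>
    intro s hk h1 h2
    have : s = 0 := by omega
    rw [this]
  | succ k ih =>
    intro s hk h1 h2
    have hs0 : s < 0 := by omega
    obtain ⟨m, hm⟩ : ∃ m : Nat, (m : Int) = -s := ⟨(-s).toNat, by omega⟩
    have hidxlt : forest.length - m < forest.length := by omega
    have hneg : PySem.List.pyGet? forest s = forest[forest.length - m]? := by
      rw [show s = -(m : Int) by omega]
      exact PySem.List.pyGet?_neg_natCast forest m (by omega) (by omega)
    have hsome : PySem.List.pyGet? forest s = some forest[forest.length - m] := by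
      rw [hneg]; exact List.getElem?_eq_getElem hidxlt
    have hval : forest[forest.length - m] = 0 := by
      apply hz
      have h2' : (forest.drop (((forest.length : Int) + bird + 1).toNat))[forest.length - m -
          ((forest.length : Int) + bird + 1).toNat]? =
          forest[((forest.length : Int) + bird + 1).toNat +
            (forest.length - m - ((forest.length : Int) + bird + 1).toNat)]? :=
        List.getElem?_drop
      rw [show ((forest.length : Int) + bird + 1).toNat +
            (forest.length - m - ((forest.length : Int) + bird + 1).toNat) =
          forest.length - m by omega,
        List.getElem?_eq_getElem hidxlt] at h2'
      exact List.mem_of_getElem? h2'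
    unfold aFindRight
    rw [show ((forest.length : Int) - s).toNat = ((forest.length : Int) - (s + 1)).toNat + 1 by omega]
    simp only [aFindRightGo]
    rw [if_pos (by omega)]
    simp only [hsome, hval, if_true]
    have := ih (s + 1) (by omega) (by omega) (by omega)
    unfold aFindRight at this
    exact this

theorem negcase (forest : List Int) (bird : Int) (hb2 : bird ≤ -2)
    (hpre : -(forest.length : Int) ≤ bird + 1)
    (hz : ∀ v ∈ forest.drop (((forest.length : Int) + bird + 1).toNat), v = 0) :
    solution forest bird = solution_alt forest bird := by
  have hn1 : 1 ≤ forest.length := by omega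
  have hmax0 : max (bird + 1) 0 = 0 := by omega
  have hmin : min bird ((forest.length : Int)) = bird := by omega
  have hLnil : Llist (forest.length : Int) bird forest = [] := by
    unfold Llist
    rw [hmin, PySem.List.pyRange_neg_one_eq_nil (by omega)]
    simp
  have hRe : Rlist (forest.length : Int) bird forest =
      (PySem.List.pyRange 0 ((forest.length : Int)) 1).filter (nzP forest) := by
    unfold Rlist; rw [hmax0]
  have hscan : aFindRight forest (bird + 1) = aFindRight forest 0 :=
    negscan forest bird hb2 hpre hz _ (bird + 1) rfl (le_refl _) (by omega)
  rw [solution_alt_eq, hLnil]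
  unfold solution
  simp only [aLoop, bLoopGo]
  simp only [if_true]
  cases hR0 : (PySem.List.pyRange 0 ((forest.length : Int)) 1).filter (nzP forest) with
  | nil =>
    have hge := findRight_nil forest _ 0 rfl (le_refl _) hR0
    rw [hscan, if_neg (show ¬(aFindRight forest 0 < (forest.length : Int)) by omega), hRe, hR0]
    simp
  | cons j rest =>
    have hfind0 : aFindRight forest 0 = j := findRight_head forest _ 0 j rest rfl (le_refl _) hR0
    have hjR : j ∈ (PySem.List.pyRange 0 ((forest.length : Int)) 1).filter (nzP forest) := by
      rw [hR0]; exact List.mem_cons_self ..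
    have hjb := PySem.List.mem_pyRange_one.mp (List.mem_of_mem_filter hjR)
    have hj0 : (0:Int) ≤ j := by omega
    have hjf : j < (forest.length : Int) := by omega
    have hg : PySem.List.pyGet? forest j = some forest[j.toNat] :=
      PySem.List.pyGet?_eq_some_getElem forest hj0 hjf
    have hgd : PySem.List.pyGetD forest j 0 = forest[j.toNat] :=
      PySem.List.pyGetD_eq_getElem forest 0 hj0 hjf
    rw [hscan, hfind0, if_pos (by omega), hg, hRe, hR0]
    rw [if_neg (show ¬((j :: rest).length ≤ 0) by simp)]
    have hgetr : (j :: rest).getD 0 0 = j := rfl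
    rw [hgetr, hgd]
    have hfl : aFindLeft (PySem.List.pySetD forest j 0) (bird - 1) = bird - 1 := by
      unfold aFindLeft
      rw [show (bird - 1 + 1).toNat = 0 by omega]
      rfl
    simp only [Bool.not_true]
    rw [aLoop_stop_left _ _ _ (by omega) _ _ (by omega),
      bLoopGo_stop _ _ _ _ (by simp) _ _ _ _ (by simp) (by simp)]
    simp [hjf]

theorem maincase (forest : List Int) (bird : Int) (hb : -1 ≤ bird) :
    solution forest bird = solution_alt forest bird := by
  rw [solution_alt_eq]
  unfold solution
  have hRlen : (Rlist (forest.length : Int) bird forest).length ≤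
      ((forest.length : Int) - max (bird + 1) 0).toNat := by
    unfold Rlist
    exact le_trans (List.length_filter_le _ _) (le_of_eq (PySem.List.length_pyRange_one ..))
  have hLlen : (Llist (forest.length : Int) bird forest).length ≤
      (min bird ((forest.length : Int)) - 1 - (-1)).toNat := by
    unfold Llist
    exact le_trans (List.length_filter_le _ _) (le_of_eq (PySem.List.length_pyRange_neg_one ..))
  exact sim forest bird hb (forest.length + 1) forest 0 0 0 [] true _
    rfl rfl rfl (fun i _ => rfl) (fun i _ => rfl) (by simp) (fun h => by simp at h)
    (by omega) (by omega)

theorem negscan2 (forest : List Int) (bird : Int) (_hb2 : bird ≤ -2)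
    (hpre : -(forest.length : Int) ≤ bird + 1) :
    ∀ (k : Nat) (s : Int), (-s).toNat = k → bird + 1 ≤ s → s < 0 →
      (∃ p : Nat, forest.length - (-s).toNat ≤ p ∧ p < forest.length ∧ forest.getD p 0 ≠ 0) →
      aFindRight forest s < 0 ∧
        ∃ w, PySem.List.pyGet? forest (aFindRight forest s) = some w ∧ w ≠ 0 := by
  intro k
  induction k with
  | zero => intro s hk h1 h2 _; omega
  | succ k ih =>
    intro s hk h1 h2 hreg
    obtain ⟨m, hm⟩ : ∃ m : Nat, (m : Int) = -s := ⟨(-s).toNat, by omega⟩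
    have hn1 : 1 ≤ forest.length := by
      obtain ⟨p, _, hp2, _⟩ := hreg; omega
    have hidxlt : forest.length - m < forest.length := by omega
    have hneg : PySem.List.pyGet? forest s = forest[forest.length - m]? := by
      rw [show s = -(m : Int) by omega]
      exact PySem.List.pyGet?_neg_natCast forest m (by omega) (by omega)
    have hsome : PySem.List.pyGet? forest s = some forest[forest.length - m] := by
      rw [hneg]; exact List.getElem?_eq_getElem hidxlt
    have hmk : (-s).toNat = m := by omega
    unfold aFindRight
    rw [show ((forest.length : Int) - s).toNat = ((forest.length : Int) - (s + 1)).toNat + 1 by omega]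
    simp only [aFindRightGo]
    rw [if_pos (by omega)]
    simp only [hsome]
    by_cases hv : forest[forest.length - m] = 0
    · simp only [hv, if_true]
      obtain ⟨p, hp1, hp2, hp3⟩ := hreg
      rw [hmk] at hp1
      have hpne : p ≠ forest.length - m := by
        intro hcon
        apply hp3
        rw [hcon, List.getD_eq_getElem?_getD, List.getElem?_eq_getElem hidxlt]
        simpa using hv
      have hs1 : s + 1 < 0 := by omega
      have := ih (s + 1) (by omega) (by omega) hs1
        ⟨p, by omega, hp2, hp3⟩
      unfold aFindRight at this
      exact this
    · rw [if_neg hv]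
      refine ⟨by omega, forest[forest.length - m], hsome, hv⟩

theorem solution_neg (forest : List Int) (bird : Int) (hb2 : bird ≤ -2)
    (hpre : -(forest.length : Int) ≤ bird + 1)
    (hD : ∃ v ∈ forest.drop (((forest.length : Int) + bird + 1).toNat), v ≠ 0) :
    ∃ jneg, jneg < 0 ∧ solution forest bird = [jneg] := by
  obtain ⟨v, hv, hvne⟩ := hD
  obtain ⟨i, hilt, hieq⟩ := List.mem_iff_getElem.mp hv
  rw [List.length_drop] at hilt
  have hp? : forest[(((forest.length : Int) + bird + 1).toNat + i)]? = some v := by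
    rw [← List.getElem?_drop, List.getElem?_eq_getElem (by rw [List.length_drop]; omega), hieq]
  have hplt : ((forest.length : Int) + bird + 1).toNat + i < forest.length := by omega
  have hgetD : forest.getD (((forest.length : Int) + bird + 1).toNat + i) 0 ≠ 0 := by
    rw [List.getD_eq_getElem?_getD, hp?]
    simpa using hvne
  have h2 := negscan2 forest bird hb2 hpre _ (bird + 1) rfl le_rfl (by omega)
    ⟨((forest.length : Int) + bird + 1).toNat + i, by omega, hplt, hgetD⟩
  obtain ⟨hneg, w, hw, hwne⟩ := h2
  refine ⟨aFindRight forest (bird + 1), hneg, ?_⟩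
  have hn1 : 1 ≤ forest.length := by omega
  unfold solution
  simp only [aLoop, if_true]
  rw [if_pos (show aFindRight forest (bird + 1) < (forest.length : Int) by omega), hw]
  simp only [Bool.not_true]
  rw [aLoop_stop_left _ _ _ (by omega) _ _ (by
    unfold aFindLeft
    rw [show (bird - 1 + 1).toNat = 0 by omega]
    show bird - 1 < 0
    omega)]
  simp

theorem bLoopGo_nonneg (forest right left : List Int)
    (hr : ∀ x ∈ right, (0:Int) ≤ x) (hl : ∀ x ∈ left, (0:Int) ≤ x) :
    ∀ (fuel : Nat) (r l : Nat) (total : Int) (out : List Int), (∀ x ∈ out, (0:Int) ≤ x) →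
      ∀ x ∈ bLoopGo forest right left fuel r l total out, (0:Int) ≤ x := by
  intro fuel
  induction fuel with
  | zero => intro r l total out hout; simpa [bLoopGo] using hout
  | succ fuel ih =>
    intro r l total out hout
    simp only [bLoopGo]
    by_cases h1 : total < 100
    · rw [if_pos h1]
      by_cases hpar : (out.length % 2 == 0) = true
      · rw [if_pos hpar]
        by_cases h2 : right.length ≤ r
        · rw [if_pos h2]; exact hout
        · rw [if_neg h2]
          refine ih _ _ _ _ ?_
          intro x hx
          rcases List.mem_append.mp hx with hx | hx
          · exact hout x hx
          · have : right.getD r 0 ∈ right := by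
              rw [List.getD_eq_getElem?_getD, List.getElem?_eq_getElem (by omega)]
              exact List.getElem_mem _
            simpa using (List.mem_singleton.mp hx) ▸ hr _ this
      · rw [if_neg hpar]
        by_cases h2 : left.length ≤ l
        · rw [if_pos h2]; exact hout
        · rw [if_neg h2]
          refine ih _ _ _ _ ?_
          intro x hx
          rcases List.mem_append.mp hx with hx | hx
          · exact hout x hx
          · have : left.getD l 0 ∈ left := by
              rw [List.getD_eq_getElem?_getD, List.getElem?_eq_getElem (by omega)]
              exact List.getElem_mem _
            simpa using (List.mem_singleton.mp hx) ▸ hl _ this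
    · rw [if_neg h1]; exact hout

theorem alt_nonneg (forest : List Int) (bird : Int) :
    ∀ x ∈ solution_alt forest bird, (0:Int) ≤ x := by
  rw [solution_alt_eq]
  refine bLoopGo_nonneg _ _ _ ?_ ?_ _ 0 0 0 [] (by simp)
  · intro x hx
    unfold Rlist at hx
    have := PySem.List.mem_pyRange_one.mp (List.mem_of_mem_filter hx)
    omega
  · intro x hx
    unfold Llist at hx
    have := PySem.List.mem_pyRange_neg_one.mp (List.mem_of_mem_filter hx)
    omega

-- ===== VERDICT (by name: the statement is the Claim_ definition above) =====
theorem solution_spec : Claim_unchanged_solution := by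
  intro forest bird _ hpre hnD
  by_cases hb : -1 ≤ bird
  · exact maincase forest bird hb
  · unfold Pre_solution at hpre
    unfold D_solution at hnD
    have hz : ∀ v ∈ forest.drop (((forest.length : Int) + bird + 1).toNat), v = 0 := by
      intro v hv
      by_contra hne
      exact hnD ⟨by omega, v, hv, hne⟩
    exact negcase forest bird (by omega) hpre hz

theorem solution_changed : Claim_changed_solution := by
  unfold Claim_changed_solution; decide

theorem solution_tight : Claim_exact_solution := by
  intro forest bird _ hpre hD heq
  unfold Pre_solution at hpre
  obtain ⟨hb2, hDex⟩ := hD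
  obtain ⟨jneg, hneg, hsol⟩ := solution_neg forest bird hb2 hpre hDex
  have hmem : jneg ∈ solution_alt forest bird := by
    rw [← heq, hsol]
    exact List.mem_cons_self ..
  exact absurd (alt_nonneg forest bird jneg hmem) (by omega)
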